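-- pv_equiv track=rewrite | github.com/ss2226/cse891-fall2011 | HW10_singhal.py | get_fishes_by_datelist
-- ===== SOURCE A (Python) =====
-- def get_fishes_by_datelist(fish_d, datelist):
--   res_dict = {}
--   for date in datelist:
--     res_dict[date] = fish_d.get(date, [])
--
--   res_list = []
--   for key in res_dict:
--     res_list.extend(res_dict[key])
--
--   return res_list
-- ===== SOURCE B (Python) =====
-- def get_fishes_by_datelist(fish_d, datelist):
--   seen = set()
--   res_list = []
--   for date in datelist:
--     if date not in seen:
--       seen.add(date)
--       res_list.extend(fish_d.get(date, []))
--   return res_list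
-- ===== Notes on version B (the rewrite author's own statement) =====
-- stated objective: simpler
-- what changed: Replaced A's two-pass dict-then-concatenate structure with a single pass over datelist that keeps a 'seen' set and extends the result in place, fusing dedup and concatenation into one loop.
import Mathlib
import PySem

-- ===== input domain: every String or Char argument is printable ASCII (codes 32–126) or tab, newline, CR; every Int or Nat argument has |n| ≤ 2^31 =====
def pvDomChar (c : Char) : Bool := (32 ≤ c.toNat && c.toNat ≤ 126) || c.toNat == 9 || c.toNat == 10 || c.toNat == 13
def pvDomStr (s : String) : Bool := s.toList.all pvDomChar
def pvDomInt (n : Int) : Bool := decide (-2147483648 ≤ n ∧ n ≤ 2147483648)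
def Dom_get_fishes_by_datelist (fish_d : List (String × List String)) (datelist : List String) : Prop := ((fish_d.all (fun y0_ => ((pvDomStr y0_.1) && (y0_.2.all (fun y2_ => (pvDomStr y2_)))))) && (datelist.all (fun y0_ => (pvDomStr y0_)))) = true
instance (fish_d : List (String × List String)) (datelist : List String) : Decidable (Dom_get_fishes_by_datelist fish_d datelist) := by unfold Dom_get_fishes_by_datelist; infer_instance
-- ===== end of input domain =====

-- B fuses A's two passes (dict build, then concatenate) into one traversal with a `seen` set guard; objective: simpler, same cost.

-- ===== PORT A =====
-- A: build res_dict[date] = fish_d.get(date, []) over datelist, then concatenate res_dict's values in key order.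
def get_fishes_by_datelist (fish_d : List (String × List String)) (datelist : List String) : List String :=
  let res_dict : PySem.Dict String (List String) :=
    datelist.foldl (fun d date => d.insert date (PySem.Dict.getD (PySem.Dict.mk fish_d) date [])) PySem.Dict.empty
  res_dict.keys.foldl (fun res_list key => res_list ++ res_dict.getD key []) []

-- ===== PORT B =====
-- B: one pass over datelist; a `seen` set guards against re-adding a repeated date's fishes.
def get_fishes_by_datelist_alt (fish_d : List (String × List String)) (datelist : List String) : List String :=
  (datelist.foldl
    (fun (st : PySem.Set String × List String) date =>
      if PySem.Set.contains st.1 date then st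
      else (PySem.Set.add st.1 date, st.2 ++ PySem.Dict.getD (PySem.Dict.mk fish_d) date []))
    (PySem.Set.empty, [])).2

-- ===== PRECONDITION & SPEC =====
def Spec_get_fishes_by_datelist (fish_d : List (String × List String)) (datelist : List String) (out : List String) : Prop := out = get_fishes_by_datelist_alt fish_d datelist
instance (fish_d : List (String × List String)) (datelist : List String) (out : List String) : Decidable (Spec_get_fishes_by_datelist fish_d datelist out) := by unfold Spec_get_fishes_by_datelist; infer_instance

-- ===== CLAIM (what is proved, stated in full; the proofs are below) =====
def Claim_equal_get_fishes_by_datelist : Prop := ∀ (fish_d : List (String × List String)) (datelist : List String), Dom_get_fishes_by_datelist fish_d datelist → Spec_get_fishes_by_datelist fish_d datelist (get_fishes_by_datelist fish_d datelist)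

-- ===== LEMMAS AND PROOFS =====

-- A's dict loop leaves existing keys' values untouched when the key is not revisited
theorem pv_foldl_insert_getD_not_mem (g : String → List String) (dl : List String)
    (d0 : PySem.Dict String (List String)) (k : String) (hk : k ∉ dl) :
    (dl.foldl (fun d x => d.insert x (g x)) d0).getD k [] = d0.getD k [] := by
  induction dl generalizing d0 with
  | nil => rfl
  | cons x xs ih =>
    simp only [List.foldl_cons]
    rw [ih _ (fun h => hk (List.mem_cons_of_mem _ h))]
    rw [PySem.Dict.getD_insert]
    simp only [List.mem_cons, not_or] at hk
    simp [hk.1]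

-- after A's dict loop, every key that occurs in datelist maps to its fish list
theorem pv_foldl_insert_getD_mem (g : String → List String) (dl : List String)
    (d0 : PySem.Dict String (List String)) (k : String) (hk : k ∈ dl) :
    (dl.foldl (fun d x => d.insert x (g x)) d0).getD k [] = g k := by
  induction dl generalizing d0 with
  | nil => cases hk
  | cons x xs ih =>
    simp only [List.foldl_cons]
    by_cases hx : k ∈ xs
    · exact ih _ hx
    · have hkx : k = x := by rcases List.mem_cons.mp hk with h | h; exact h; exact absurd h hx
      rw [pv_foldl_insert_getD_not_mem g xs _ k hx, PySem.Dict.getD_insert]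
      simp [hkx]

-- recursive form of B's loop, ignoring the accumulator
def pvLoopB (g : String → List String) : List String → PySem.Set String → List String
  | [], _ => []
  | x :: xs, seen =>
      if PySem.Set.contains seen x then pvLoopB g xs seen
      else g x ++ pvLoopB g xs (PySem.Set.add seen x)

theorem pv_foldlB_eq_loopB (g : String → List String) (dl : List String)
    (seen : PySem.Set String) (res : List String) :
    (dl.foldl (fun (st : PySem.Set String × List String) date =>
        if PySem.Set.contains st.1 date then st
        else (PySem.Set.add st.1 date, st.2 ++ g date)) (seen, res)).2
      = res ++ pvLoopB g dl seen := by
  induction dl generalizing seen res with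
  | nil => simp [pvLoopB]
  | cons x xs ih =>
    simp only [List.foldl_cons, pvLoopB]
    by_cases h : PySem.Set.contains seen x
    · simp only [h, if_pos]
      exact ih seen res
    · simp only [h, if_neg, Bool.false_eq_true, not_false_iff]
      rw [ih]
      simp [List.append_assoc]

-- B's loop produces exactly the concatenation over the fresh part of the updated seen-set
theorem pv_loopB_eq (g : String → List String) (dl : List String) (seen : PySem.Set String) :
    pvLoopB g dl seen = ((PySem.Set.update seen dl).drop seen.length).flatMap g := by
  induction dl generalizing seen with
  | nil => simp [pvLoopB, PySem.Set.update]
  | cons x xs ih =>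
    rw [PySem.Set.update_cons]
    simp only [pvLoopB]
    by_cases h : PySem.Set.contains seen x
    · have hm : x ∈ seen := (PySem.Set.contains_iff seen x).mp h
      rw [if_pos h, PySem.Set.add_of_mem hm, ih]
    · have hm : x ∉ seen := fun hx => h ((PySem.Set.contains_iff seen x).mpr hx)
      rw [if_neg h, ih]
      rw [PySem.Set.update_eq_append_filter (PySem.Set.add seen x) xs]
      rw [PySem.Set.add_of_not_mem hm]
      set t := (PySem.Set.ofList xs).filter (fun y => !(PySem.Set.contains (seen ++ [x]) y)) with hts
      have h1 : ((seen ++ [x]) ++ t).drop seen.length = x :: t := by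
        rw [List.append_assoc, List.drop_left]; rfl
      have h2 : ((seen ++ [x]) ++ t).drop (seen ++ [x]).length = t := List.drop_left
      rw [h1, h2, List.flatMap_cons]

-- flatMap respects pointwise agreement on members
theorem pv_flatMap_congr (f h : String → List String) (l : List String)
    (hfg : ∀ x ∈ l, f x = h x) : l.flatMap f = l.flatMap h := by
  induction l with
  | nil => rfl
  | cons x xs ih =>
    simp only [List.flatMap_cons]
    rw [hfg x (List.mem_cons_self), ih (fun y hy => hfg y (List.mem_cons_of_mem _ hy))]

-- ===== VERDICT (by name: the statement is the Claim_ definition above) =====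
theorem get_fishes_by_datelist_spec : Claim_equal_get_fishes_by_datelist := by
  intro fish_d datelist _
  unfold Spec_get_fishes_by_datelist get_fishes_by_datelist get_fishes_by_datelist_alt
  set g : String → List String := fun date => PySem.Dict.getD (PySem.Dict.mk fish_d) date [] with hg
  set d' := datelist.foldl (fun d date => d.insert date (g date)) PySem.Dict.empty with hd'
  rw [PySem.List.foldl_append_eq_flatMap, pv_foldlB_eq_loopB, pv_loopB_eq]
  simp only [List.nil_append, PySem.Set.empty, List.length_nil, List.drop_zero]
  have hkeys : d'.keys = PySem.Set.update ([] : PySem.Set String) datelist :=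
    PySem.Dict.keys_foldl_insert datelist (fun _ x => g x) _
  rw [hkeys]
  apply pv_flatMap_congr
  intro k hk
  have hkmem : k ∈ datelist := by
    have hof : PySem.Set.update ([] : PySem.Set String) datelist = PySem.Set.ofList datelist := rfl
    rw [hof] at hk
    exact (PySem.Set.mem_ofList datelist k).mp hk
  exact pv_foldl_insert_getD_mem g datelist _ k hkmem
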